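-- pv_equiv track=rewrite | github.com/pjongk148/Algorithm | 프로그래머스/lv1/42840. 모의고사/모의고사.py | solution
-- ===== SOURCE A (Python) =====
-- def solution(answers):
--     ans_1 = [1,2,3,4,5]
--     ans_2 = [2, 1, 2, 3, 2, 4, 2, 5]
--     ans_3 = [3, 3, 1, 1, 2, 2, 4, 4, 5, 5]
--     count = [0,0,0]
--     ans_1 = ans_1 * (len(answers) // 5) + ans_1[:len(answers) % 5]
--     ans_2 = ans_2 * (len(answers) // 5) + ans_2[:len(answers) % 5]
--     ans_3 = ans_3 * (len(answers) // 5) + ans_3[:len(answers) % 5]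
--
--     ans = []
--     for i in range(len(answers)):
--         if ans_1[i] == answers[i]:
--             count[0]+=1
--         if ans_2[i] == answers[i]:
--             count[1]+=1
--         if ans_3[i] == answers[i]:
--             count[2]+=1
--
--     for i in range(len(count)):
--         if count[i] == max(count):
--             ans.append(i+1)
--     return ans
-- ===== SOURCE B (Python) =====
-- def solution(answers):
--     patterns = [[1, 2, 3, 4, 5],
--                 [2, 1, 2, 3, 2, 4, 2, 5],
--                 [3, 3, 1, 1, 2, 2, 4, 4, 5, 5]]
--     # one pass: histogram of (index mod 40, answer) pairs (40 = lcm of the three periods)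
--     hist = {}
--     for i, a in enumerate(answers):
--         key = (i % 40, a)
--         hist[key] = hist.get(key, 0) + 1
--     # each score is a fixed 40-term lookup sum; the answers are never rescanned
--     scores = [sum(hist.get((r, pat[r % len(pat)]), 0) for r in range(40))
--               for pat in patterns]
--     m = max(scores)
--     return [k + 1 for k, s in enumerate(scores) if s == m]
-- ===== Notes on version B (the rewrite author's own statement) =====
-- stated objective: alternative
-- what changed: B replaces A's per-index matching against three pre-tiled pattern lists by a bucketing algorithm: one pass builds a histogram dict keyed by (index mod 40, answer) (40 = lcm of the pattern periods), and each pattern's score is then a fixed 40-term lookup sum over that histogram, so the answers are scanned exactly once and never compared against any pattern directly.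
import Mathlib
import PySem

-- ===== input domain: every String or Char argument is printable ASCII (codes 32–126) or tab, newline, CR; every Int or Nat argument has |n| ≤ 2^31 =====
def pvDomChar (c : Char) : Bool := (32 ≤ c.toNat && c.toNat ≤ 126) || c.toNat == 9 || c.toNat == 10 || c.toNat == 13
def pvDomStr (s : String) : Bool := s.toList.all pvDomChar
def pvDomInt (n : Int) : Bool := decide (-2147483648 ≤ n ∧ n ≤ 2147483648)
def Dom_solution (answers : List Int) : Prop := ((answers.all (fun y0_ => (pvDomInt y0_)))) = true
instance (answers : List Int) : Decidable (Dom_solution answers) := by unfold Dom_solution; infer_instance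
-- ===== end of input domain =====

-- B buckets the answers once into a histogram keyed by (index mod 40, answer) and reads each
-- pattern's score off the histogram as a fixed 40-term sum, instead of A's pre-tiled pattern
-- lists and fused triple-counter loop (objective: alternative).

-- ===== PORT A =====
-- Python local variables (ans_1.., count, max(count)) are inlined; each occurrence is the same
-- computation A performs.
def solution (answers : List Int) : List Int :=
  (PySem.List.pyRange 0 3 1).foldl
    (fun ans i =>
      if PySem.List.pyGetD
          [((PySem.List.pyRange 0 (PySem.List.len answers) 1).foldl
              (fun (c : Int × Int × Int) i =>
                (if PySem.List.pyGetD (PySem.List.pyRepeat [1, 2, 3, 4, 5] (PySem.Int.floordiv (PySem.List.len answers) 5) ++ PySem.List.slice [1, 2, 3, 4, 5] none (some (PySem.Int.mod (PySem.List.len answers) 5))) i 0 == PySem.List.pyGetD answers i 0 then c.1 + 1 else c.1,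
                 if PySem.List.pyGetD (PySem.List.pyRepeat [2, 1, 2, 3, 2, 4, 2, 5] (PySem.Int.floordiv (PySem.List.len answers) 5) ++ PySem.List.slice [2, 1, 2, 3, 2, 4, 2, 5] none (some (PySem.Int.mod (PySem.List.len answers) 5))) i 0 == PySem.List.pyGetD answers i 0 then c.2.1 + 1 else c.2.1,
                 if PySem.List.pyGetD (PySem.List.pyRepeat [3, 3, 1, 1, 2, 2, 4, 4, 5, 5] (PySem.Int.floordiv (PySem.List.len answers) 5) ++ PySem.List.slice [3, 3, 1, 1, 2, 2, 4, 4, 5, 5] none (some (PySem.Int.mod (PySem.List.len answers) 5))) i 0 == PySem.List.pyGetD answers i 0 then c.2.2 + 1 else c.2.2))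
              (0, 0, 0)).1,
           ((PySem.List.pyRange 0 (PySem.List.len answers) 1).foldl
              (fun (c : Int × Int × Int) i =>
                (if PySem.List.pyGetD (PySem.List.pyRepeat [1, 2, 3, 4, 5] (PySem.Int.floordiv (PySem.List.len answers) 5) ++ PySem.List.slice [1, 2, 3, 4, 5] none (some (PySem.Int.mod (PySem.List.len answers) 5))) i 0 == PySem.List.pyGetD answers i 0 then c.1 + 1 else c.1,
                 if PySem.List.pyGetD (PySem.List.pyRepeat [2, 1, 2, 3, 2, 4, 2, 5] (PySem.Int.floordiv (PySem.List.len answers) 5) ++ PySem.List.slice [2, 1, 2, 3, 2, 4, 2, 5] none (some (PySem.Int.mod (PySem.List.len answers) 5))) i 0 == PySem.List.pyGetD answers i 0 then c.2.1 + 1 else c.2.1,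
                 if PySem.List.pyGetD (PySem.List.pyRepeat [3, 3, 1, 1, 2, 2, 4, 4, 5, 5] (PySem.Int.floordiv (PySem.List.len answers) 5) ++ PySem.List.slice [3, 3, 1, 1, 2, 2, 4, 4, 5, 5] none (some (PySem.Int.mod (PySem.List.len answers) 5))) i 0 == PySem.List.pyGetD answers i 0 then c.2.2 + 1 else c.2.2))
              (0, 0, 0)).2.1,
           ((PySem.List.pyRange 0 (PySem.List.len answers) 1).foldl
              (fun (c : Int × Int × Int) i =>
                (if PySem.List.pyGetD (PySem.List.pyRepeat [1, 2, 3, 4, 5] (PySem.Int.floordiv (PySem.List.len answers) 5) ++ PySem.List.slice [1, 2, 3, 4, 5] none (some (PySem.Int.mod (PySem.List.len answers) 5))) i 0 == PySem.List.pyGetD answers i 0 then c.1 + 1 else c.1,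
                 if PySem.List.pyGetD (PySem.List.pyRepeat [2, 1, 2, 3, 2, 4, 2, 5] (PySem.Int.floordiv (PySem.List.len answers) 5) ++ PySem.List.slice [2, 1, 2, 3, 2, 4, 2, 5] none (some (PySem.Int.mod (PySem.List.len answers) 5))) i 0 == PySem.List.pyGetD answers i 0 then c.2.1 + 1 else c.2.1,
                 if PySem.List.pyGetD (PySem.List.pyRepeat [3, 3, 1, 1, 2, 2, 4, 4, 5, 5] (PySem.Int.floordiv (PySem.List.len answers) 5) ++ PySem.List.slice [3, 3, 1, 1, 2, 2, 4, 4, 5, 5] none (some (PySem.Int.mod (PySem.List.len answers) 5))) i 0 == PySem.List.pyGetD answers i 0 then c.2.2 + 1 else c.2.2))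
              (0, 0, 0)).2.2]
          i 0
        == (PySem.List.max?
              [((PySem.List.pyRange 0 (PySem.List.len answers) 1).foldl
                  (fun (c : Int × Int × Int) i =>
                    (if PySem.List.pyGetD (PySem.List.pyRepeat [1, 2, 3, 4, 5] (PySem.Int.floordiv (PySem.List.len answers) 5) ++ PySem.List.slice [1, 2, 3, 4, 5] none (some (PySem.Int.mod (PySem.List.len answers) 5))) i 0 == PySem.List.pyGetD answers i 0 then c.1 + 1 else c.1,
                     if PySem.List.pyGetD (PySem.List.pyRepeat [2, 1, 2, 3, 2, 4, 2, 5] (PySem.Int.floordiv (PySem.List.len answers) 5) ++ PySem.List.slice [2, 1, 2, 3, 2, 4, 2, 5] none (some (PySem.Int.mod (PySem.List.len answers) 5))) i 0 == PySem.List.pyGetD answers i 0 then c.2.1 + 1 else c.2.1,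
                     if PySem.List.pyGetD (PySem.List.pyRepeat [3, 3, 1, 1, 2, 2, 4, 4, 5, 5] (PySem.Int.floordiv (PySem.List.len answers) 5) ++ PySem.List.slice [3, 3, 1, 1, 2, 2, 4, 4, 5, 5] none (some (PySem.Int.mod (PySem.List.len answers) 5))) i 0 == PySem.List.pyGetD answers i 0 then c.2.2 + 1 else c.2.2))
                  (0, 0, 0)).1,
               ((PySem.List.pyRange 0 (PySem.List.len answers) 1).foldl
                  (fun (c : Int × Int × Int) i =>
                    (if PySem.List.pyGetD (PySem.List.pyRepeat [1, 2, 3, 4, 5] (PySem.Int.floordiv (PySem.List.len answers) 5) ++ PySem.List.slice [1, 2, 3, 4, 5] none (some (PySem.Int.mod (PySem.List.len answers) 5))) i 0 == PySem.List.pyGetD answers i 0 then c.1 + 1 else c.1,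
                     if PySem.List.pyGetD (PySem.List.pyRepeat [2, 1, 2, 3, 2, 4, 2, 5] (PySem.Int.floordiv (PySem.List.len answers) 5) ++ PySem.List.slice [2, 1, 2, 3, 2, 4, 2, 5] none (some (PySem.Int.mod (PySem.List.len answers) 5))) i 0 == PySem.List.pyGetD answers i 0 then c.2.1 + 1 else c.2.1,
                     if PySem.List.pyGetD (PySem.List.pyRepeat [3, 3, 1, 1, 2, 2, 4, 4, 5, 5] (PySem.Int.floordiv (PySem.List.len answers) 5) ++ PySem.List.slice [3, 3, 1, 1, 2, 2, 4, 4, 5, 5] none (some (PySem.Int.mod (PySem.List.len answers) 5))) i 0 == PySem.List.pyGetD answers i 0 then c.2.2 + 1 else c.2.2))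
                  (0, 0, 0)).2.1,
               ((PySem.List.pyRange 0 (PySem.List.len answers) 1).foldl
                  (fun (c : Int × Int × Int) i =>
                    (if PySem.List.pyGetD (PySem.List.pyRepeat [1, 2, 3, 4, 5] (PySem.Int.floordiv (PySem.List.len answers) 5) ++ PySem.List.slice [1, 2, 3, 4, 5] none (some (PySem.Int.mod (PySem.List.len answers) 5))) i 0 == PySem.List.pyGetD answers i 0 then c.1 + 1 else c.1,
                     if PySem.List.pyGetD (PySem.List.pyRepeat [2, 1, 2, 3, 2, 4, 2, 5] (PySem.Int.floordiv (PySem.List.len answers) 5) ++ PySem.List.slice [2, 1, 2, 3, 2, 4, 2, 5] none (some (PySem.Int.mod (PySem.List.len answers) 5))) i 0 == PySem.List.pyGetD answers i 0 then c.2.1 + 1 else c.2.1,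
                     if PySem.List.pyGetD (PySem.List.pyRepeat [3, 3, 1, 1, 2, 2, 4, 4, 5, 5] (PySem.Int.floordiv (PySem.List.len answers) 5) ++ PySem.List.slice [3, 3, 1, 1, 2, 2, 4, 4, 5, 5] none (some (PySem.Int.mod (PySem.List.len answers) 5))) i 0 == PySem.List.pyGetD answers i 0 then c.2.2 + 1 else c.2.2))
                  (0, 0, 0)).2.2]
              (fun y => y)).getD 0
      then ans ++ [i + 1] else ans) []

-- ===== PORT B =====
-- Source B's local 'hist' (the for-loop building the dict) and the per-pattern generator sum,
-- as helper definitions; 'scores', 'm' and the final comprehension are in solution_alt.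
def bHist (answers : List Int) : PySem.Dict (Int × Int) Int :=
  (PySem.List.enumerate answers 0).foldl
    (fun d ia =>
      d.insert (PySem.Int.mod ia.1 40, ia.2) (d.getD (PySem.Int.mod ia.1 40, ia.2) 0 + 1))
    PySem.Dict.empty

def bScore (answers : List Int) (pat : List Int) : Int :=
  (PySem.List.pyRange 0 40 1).foldl
    (fun s r =>
      s + (bHist answers).getD (r, PySem.List.pyGetD pat (PySem.Int.mod r (PySem.List.len pat)) 0) 0)
    0

def solution_alt (answers : List Int) : List Int :=
  (PySem.List.enumerate
      (List.map (bScore answers)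
        [[1, 2, 3, 4, 5], [2, 1, 2, 3, 2, 4, 2, 5], [3, 3, 1, 1, 2, 2, 4, 4, 5, 5]]) 0).filterMap
    (fun ks =>
      if ks.2 ==
          (PySem.List.max?
            (List.map (bScore answers)
              [[1, 2, 3, 4, 5], [2, 1, 2, 3, 2, 4, 2, 5], [3, 3, 1, 1, 2, 2, 4, 4, 5, 5]])
            (fun y => y)).getD 0
      then some (ks.1 + 1) else none)

-- ===== PRECONDITION & SPEC =====
def Spec_solution (answers : List Int) (out : List Int) : Prop := out = solution_alt answers
instance (answers : List Int) (out : List Int) : Decidable (Spec_solution answers out) := by unfold Spec_solution; infer_instance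

-- ===== CLAIM (what is proved, stated in full; the proofs are below) =====
def Claim_equal_solution : Prop := ∀ (answers : List Int), Dom_solution answers → Spec_solution answers (solution answers)

-- ===== LEMMAS AND PROOFS =====

-- tiled list indexing: (pat * q + pat[:r])[i] = pat[i % len(pat)]
theorem tile_getD (pat : List Int) (q r i : Nat) (hr : r ≤ pat.length)
    (hi : i < pat.length * q + r) :
    ((List.replicate q pat).flatten ++ pat.take r).getD i 0 = pat.getD (i % pat.length) 0 := by
  induction q generalizing i with
  | zero =>
    have hir : i < r := by simpa using hi
    have hiL : i < pat.length := lt_of_lt_of_le hir hr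
    simp [List.getD, Nat.mod_eq_of_lt hiL, hir]
  | succ q ih =>
    have hflat : (List.replicate (q+1) pat).flatten = pat ++ (List.replicate q pat).flatten := by
      simp [List.replicate_succ]
    rw [hflat, List.append_assoc]
    by_cases hiL : i < pat.length
    · simp [List.getD, List.getElem?_append, hiL, Nat.mod_eq_of_lt hiL]
    · push_neg at hiL
      have h1 : (pat ++ ((List.replicate q pat).flatten ++ pat.take r)).getD i 0
          = ((List.replicate q pat).flatten ++ pat.take r).getD (i - pat.length) 0 := by
        simp [List.getD, List.getElem?_append_right hiL]
      have h2 : (i - pat.length) % pat.length = i % pat.length := by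
        conv_rhs => rw [← Nat.sub_add_cancel hiL]
        rw [Nat.add_mod_right]
      rw [Nat.mul_succ] at hi
      rw [h1, ih (i - pat.length) (by omega), h2]

-- A's tiled list agrees with modulo indexing into the pattern on every in-range index
theorem tiledD (pat : List Int) (h5 : 5 ≤ pat.length) (n i : Nat) (hi : i < n) :
    PySem.List.pyGetD
      (PySem.List.pyRepeat pat (PySem.Int.floordiv (n : Int) 5) ++
        PySem.List.slice pat none (some (PySem.Int.mod (n : Int) 5))) (i : Int) 0
      = PySem.List.pyGetD pat (PySem.Int.mod (i : Int) (pat.length : Int)) 0 := by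
  have e5 : (5 : Int) = ((5 : Nat) : Int) := by norm_cast
  rw [e5, PySem.Int.floordiv_natCast, PySem.Int.mod_natCast, PySem.Int.mod_natCast,
    PySem.List.slice_to_natCast]
  simp only [PySem.List.pyRepeat, Int.toNat_natCast, PySem.List.pyGetD_natCast]
  exact tile_getD pat (n / 5) (n % 5) i (le_trans (le_of_lt (Nat.mod_lt n (by omega))) h5)
    (by
      have := Nat.div_add_mod n 5
      have hmul : 5 * (n / 5) ≤ pat.length * (n / 5) := Nat.mul_le_mul_right _ h5
      omega)

-- a loop with a triple of independent conditional counters is three counts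
theorem foldl_triple (p1 p2 p3 : Int → Bool) (l : List Int) (a b c : Int) :
    l.foldl (fun (s : Int × Int × Int) i =>
        (if p1 i then s.1 + 1 else s.1,
         if p2 i then s.2.1 + 1 else s.2.1,
         if p3 i then s.2.2 + 1 else s.2.2)) (a, b, c)
      = (a + (l.countP p1 : Int), b + (l.countP p2 : Int), c + (l.countP p3 : Int)) := by
  induction l generalizing a b c with
  | nil => simp
  | cons x t ih =>
    simp only [List.foldl_cons, List.countP_cons, ih]
    split_ifs <;> simp_all <;> ring_nf <;> simp

-- A's per-pattern count equals the modulo-indexed match count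
theorem count_eq (answers : List Int) (pat : List Int) (h5 : 5 ≤ pat.length) :
    ((PySem.List.pyRange 0 (PySem.List.len answers) 1).countP
      (fun i => PySem.List.pyGetD
          (PySem.List.pyRepeat pat (PySem.Int.floordiv (PySem.List.len answers) 5) ++
            PySem.List.slice pat none (some (PySem.Int.mod (PySem.List.len answers) 5))) i 0
        == PySem.List.pyGetD answers i 0))
    = ((PySem.List.enumerate answers 0).countP
        (fun ia => ia.2 == PySem.List.pyGetD pat (PySem.Int.mod ia.1 (PySem.List.len pat)) 0)) := by
  rw [PySem.List.enumerate_eq_map_pyRange answers 0, List.countP_map]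
  apply List.countP_congr
  intro x hx
  obtain ⟨h0, hlt⟩ := (PySem.List.mem_pyRange_one).mp hx
  have hlen : x.toNat < answers.length := by
    simp only [PySem.List.len] at hlt; omega
  have hk : x = ((x.toNat : Nat) : Int) := by omega
  rw [hk]
  simp only [Function.comp, PySem.List.len]
  rw [tiledD pat h5 answers.length x.toNat hlen]
  simp only [beq_iff_eq]
  exact eq_comm

-- a foldl accumulating '+ f r' is the sum of the mapped list
theorem foldl_add_eq_sum_map (rs : List Int) (f : Int → Int) (a : Int) :
    rs.foldl (fun s r => s + f r) a = a + (rs.map f).sum := by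
  induction rs generalizing a with
  | nil => simp
  | cons r t ih => simp [ih]; ring

-- if k occurs nowhere in rs, a sum of indicators keyed at k is 0
theorem sum_ite_pair_notmem (rs : List Int) (k a : Int) (v : Int → Int) (hk : k ∉ rs) :
    (rs.map (fun r => if k = r ∧ a = v r then (1 : Int) else 0)).sum = 0 := by
  induction rs with
  | nil => simp
  | cons r t ih =>
    have hne : k ≠ r := fun h => hk (h ▸ List.mem_cons_self)
    rw [List.map_cons, List.sum_cons, if_neg (fun h => hne h.1),
      ih (fun h => hk (List.mem_cons_of_mem _ h)), add_zero]

-- a sum of pair-indicators over a nodup list containing k picks exactly the k term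
theorem sum_ite_pair (rs : List Int) (hnd : rs.Nodup) (k a : Int) (v : Int → Int) (hk : k ∈ rs) :
    (rs.map (fun r => if k = r ∧ a = v r then (1 : Int) else 0)).sum
      = if a = v k then 1 else 0 := by
  induction rs with
  | nil => cases hk
  | cons r t ih =>
    rcases List.nodup_cons.mp hnd with ⟨hr, hnd'⟩
    rw [List.map_cons, List.sum_cons]
    by_cases hkr : k = r
    · subst hkr
      rw [sum_ite_pair_notmem t k a v hr, add_zero]
      by_cases hav : a = v k
      · rw [if_pos ⟨rfl, hav⟩, if_pos hav]
      · rw [if_neg (fun h => hav h.2), if_neg hav]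
    · have hkt : k ∈ t := by
        cases List.mem_cons.mp hk with
        | inl h => exact absurd h hkr
        | inr h => exact h
      rw [if_neg (fun h => hkr h.1), ih hnd' hkt, zero_add]

-- summing histogram counts over one full period of residues recovers the match count
theorem sum_count_key (l : List (Int × Int)) (v : Int → Int) :
    ((PySem.List.pyRange 0 40 1).map
        (fun r => ((l.map (fun ia => (PySem.Int.mod ia.1 40, ia.2))).count (r, v r) : Int))).sum
      = (l.countP (fun ia => ia.2 == v (PySem.Int.mod ia.1 40)) : Int) := by
  induction l with
  | nil => simp
  | cons x t ih =>
    have hcnt : ∀ r : Int,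
        (((x :: t).map (fun ia => (PySem.Int.mod ia.1 40, ia.2))).count (r, v r) : Int)
          = ((t.map (fun ia => (PySem.Int.mod ia.1 40, ia.2))).count (r, v r) : Int)
            + (if PySem.Int.mod x.1 40 = r ∧ x.2 = v r then (1 : Int) else 0) := by
      intro r
      simp only [List.map_cons, List.count_cons, beq_iff_eq, Prod.mk.injEq]
      split_ifs with h1 h2 h2 <;> simp_all <;> push_cast <;> ring
    have hsplit :
        ((PySem.List.pyRange 0 40 1).map
            (fun r => (((x :: t).map (fun ia => (PySem.Int.mod ia.1 40, ia.2))).count (r, v r) : Int))).sum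
          = ((PySem.List.pyRange 0 40 1).map
              (fun r => ((t.map (fun ia => (PySem.Int.mod ia.1 40, ia.2))).count (r, v r) : Int))).sum
            + ((PySem.List.pyRange 0 40 1).map
              (fun r => if PySem.Int.mod x.1 40 = r ∧ x.2 = v r then (1 : Int) else 0)).sum := by
      simp only [hcnt]
      rw [← List.sum_map_add]
    have hmod : PySem.Int.mod x.1 40 ∈ PySem.List.pyRange 0 40 1 := by
      rw [PySem.List.mem_pyRange_one, PySem.Int.mod_eq_emod_of_pos (by norm_num : (0:Int) < 40)]
      exact ⟨Int.emod_nonneg _ (by norm_num), Int.emod_lt_of_pos _ (by norm_num)⟩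
    have hone := sum_ite_pair (PySem.List.pyRange 0 40 1) (PySem.List.nodup_pyRange_one 0 40)
      (PySem.Int.mod x.1 40) x.2 v hmod
    rw [hsplit, ih, hone, List.countP_cons]
    by_cases h : x.2 = v (PySem.Int.mod x.1 40)
    · rw [if_pos h]
      simp only [h, beq_self_eq_true, if_true]
      push_cast; ring
    · rw [if_neg h]
      have hb : (x.2 == v (PySem.Int.mod x.1 40)) = false := beq_false_of_ne h
      simp only [hb, if_false]
      push_cast; ring

-- B's histogram lookup is a count over the keyed list
theorem bHist_getD (answers : List Int) (k : Int × Int) :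
    (bHist answers).getD k 0
      = (((PySem.List.enumerate answers 0).map (fun ia => (PySem.Int.mod ia.1 40, ia.2))).count k : Int) := by
  unfold bHist
  have h := PySem.Dict.getD_foldl_insert_add_one
    ((PySem.List.enumerate answers 0).map (fun ia => (PySem.Int.mod ia.1 40, ia.2)))
    (PySem.Dict.empty : PySem.Dict (Int × Int) Int) k
  rw [List.foldl_map] at h
  simpa using h

-- floor-mod collapses through a multiple of the modulus
theorem mod_mod_of_dvd (i : Int) (L : Int) (hL : 0 < L) (hdvd : L ∣ 40) :
    PySem.Int.mod (PySem.Int.mod i 40) L = PySem.Int.mod i L := by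
  rw [PySem.Int.mod_eq_emod_of_pos (by norm_num : (0:Int) < 40),
    PySem.Int.mod_eq_emod_of_pos hL, PySem.Int.mod_eq_emod_of_pos hL]
  exact Int.emod_emod_of_dvd i hdvd

-- B's score is the modulo-indexed match count
theorem bScore_eq (answers : List Int) (pat : List Int) (hL : 0 < pat.length)
    (hdvd : (pat.length : Int) ∣ 40) :
    bScore answers pat
      = ((PySem.List.enumerate answers 0).countP
          (fun ia => ia.2 == PySem.List.pyGetD pat (PySem.Int.mod ia.1 (PySem.List.len pat)) 0)) := by
  unfold bScore
  rw [foldl_add_eq_sum_map, zero_add]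
  simp only [bHist_getD]
  rw [sum_count_key (PySem.List.enumerate answers 0)
    (fun r => PySem.List.pyGetD pat (PySem.Int.mod r (PySem.List.len pat)) 0)]
  congr 1
  apply List.countP_congr
  intro ia _
  simp only [PySem.List.len]
  rw [mod_mod_of_dvd ia.1 (pat.length : Int) (by exact_mod_cast hL) hdvd]

-- the two selection phases coincide on any triple of scores
theorem select_eq (s1 s2 s3 : Int) :
    ((PySem.List.pyRange 0 3 1).foldl
      (fun ans i =>
        if PySem.List.pyGetD [s1, s2, s3] i 0 == (PySem.List.max? [s1, s2, s3] (fun y => y)).getD 0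
        then ans ++ [i + 1] else ans) [])
    = (PySem.List.enumerate [s1, s2, s3] 0).filterMap
        (fun is => if is.2 == (PySem.List.max? [s1, s2, s3] (fun y => y)).getD 0
          then some (is.1 + 1) else none) := by
  have h3 : PySem.List.pyRange 0 3 1 = [0, 1, 2] := by decide
  rw [h3]
  simp only [PySem.List.enumerate_cons, PySem.List.enumerate_nil, List.foldl_cons,
    List.foldl_nil, List.filterMap_cons, List.filterMap_nil]
  simp [PySem.List.pyGetD]
  split_ifs <;> simp

-- ===== VERDICT (by name: the statement is the Claim_ definition above) =====
theorem solution_spec : Claim_equal_solution := by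
  intro answers _
  show solution answers = solution_alt answers
  unfold solution solution_alt
  rw [foldl_triple]
  dsimp only
  rw [count_eq answers [1,2,3,4,5] (by decide),
      count_eq answers [2,1,2,3,2,4,2,5] (by decide),
      count_eq answers [3,3,1,1,2,2,4,4,5,5] (by decide)]
  simp only [zero_add, List.map_cons, List.map_nil]
  rw [← bScore_eq answers [1,2,3,4,5] (by decide) (by decide),
      ← bScore_eq answers [2,1,2,3,2,4,2,5] (by decide) (by decide),
      ← bScore_eq answers [3,3,1,1,2,2,4,4,5,5] (by decide) (by decide)]
  exact select_eq _ _ _
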